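-- pv_equiv track=rewrite | github.com/chenxu2394/ls-gcp | gen.py | generate_base_grid
-- ===== SOURCE A (Python) =====
-- def generate_base_grid(width, height):
--     grid = []
--     for row in range(height):
--         if row % 3 == 0:
--             row_data = []
--             for col in range(width):
--                 row_data.append('r' if col % 8 else 'Q')
--             grid.append(row_data)
--         else:
--             grid.append(['r'] * width)
--     return grid
-- ===== SOURCE B (Python) =====
-- def generate_base_grid(width, height):
--     grid = [['r'] * width for _ in range(height)]
--     for r in range(0, height, 3):
--         row = grid[r]
--         for c in range(0, width, 8):
--             row[c] = 'Q'
--     return grid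
-- ===== Notes on version B (the rewrite author's own statement) =====
-- stated objective: alternative
-- what changed: Instead of deciding every cell with a predicate as A does, B first fills the whole grid with 'r' and then sparsely overwrites only the Q positions by iterating stepped ranges range(0,height,3) x range(0,width,8), touching ~w*h/24 cells in the second stage.
import Mathlib
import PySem

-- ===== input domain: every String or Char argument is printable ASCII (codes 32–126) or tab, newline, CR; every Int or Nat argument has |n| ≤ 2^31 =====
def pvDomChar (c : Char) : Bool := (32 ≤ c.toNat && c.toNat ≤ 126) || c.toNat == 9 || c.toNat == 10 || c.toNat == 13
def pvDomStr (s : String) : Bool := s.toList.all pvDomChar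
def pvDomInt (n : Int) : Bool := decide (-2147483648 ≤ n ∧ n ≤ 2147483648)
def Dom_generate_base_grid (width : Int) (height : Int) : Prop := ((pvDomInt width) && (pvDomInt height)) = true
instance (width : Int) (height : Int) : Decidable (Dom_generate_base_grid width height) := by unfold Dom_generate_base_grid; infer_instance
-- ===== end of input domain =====

-- B builds an all-'r' grid first and then sparsely overwrites only the Q positions via stepped ranges (alternative two-stage algorithm).


-- ===== PORT A =====
def generate_base_grid (width : Int) (height : Int) : List (List String) :=
  (PySem.List.pyRange 0 height 1).foldl (fun grid row =>
    if row % 3 == 0 then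
      grid ++ [(PySem.List.pyRange 0 width 1).foldl
        (fun row_data col => row_data ++ [if col % 8 != 0 then "r" else "Q"]) []]
    else
      grid ++ [List.replicate width.toNat "r"]) []

-- ===== PORT B =====
-- grid = [['r'] * width for _ in range(height)]; then for r in range(0,height,3): for c in range(0,width,8): grid[r][c] = 'Q'
-- (the Python mutates row r in place; here that is row r replaced by the inner fold's result, indices always in range)
def generate_base_grid_alt (width : Int) (height : Int) : List (List String) :=
  let grid := (PySem.List.pyRange 0 height 1).map (fun _ => List.replicate width.toNat "r")
  (PySem.List.pyRange 0 height 3).foldl (fun g r =>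
    g.set r.toNat
      ((PySem.List.pyRange 0 width 8).foldl (fun row c => row.set c.toNat "Q")
        (g.getD r.toNat []))) grid

-- ===== PRECONDITION & SPEC =====
def Spec_generate_base_grid (width : Int) (height : Int) (out : List (List String)) : Prop := out = generate_base_grid_alt width height
instance (width : Int) (height : Int) (out : List (List String)) : Decidable (Spec_generate_base_grid width height out) := by unfold Spec_generate_base_grid; infer_instance

-- ===== CLAIM (what is proved, stated in full; the proofs are below) =====
def Claim_equal_generate_base_grid : Prop := ∀ (width : Int) (height : Int), Dom_generate_base_grid width height → Spec_generate_base_grid width height (generate_base_grid width height)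

-- ===== LEMMAS AND PROOFS =====

theorem pv_flatten_map_singleton {α β : Type} (f : α → β) (l : List α) :
    (List.map (fun x => [f x]) l).flatten = List.map f l := by
  induction l with
  | nil => rfl
  | cons x xs ih => simp [ih]

-- A's append-fold with a branch is a map
theorem pv_foldl_if_append {α β : Type} (c : α → Bool) (f g : α → β) (l : List α) (acc : List β) :
    l.foldl (fun acc x => if c x then acc ++ [f x] else acc ++ [g x]) acc
      = acc ++ l.map (fun x => if c x then f x else g x) := by
  induction l generalizing acc with
  | nil => simp
  | cons x xs ih =>
    by_cases h : c x = true <;> simp [List.foldl, h, ih, List.append_assoc]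

-- B's set-folds: elementwise characterisation (needs distinct target indices)
theorem pv_foldl_set_getElem? {α : Type} (f : α → α) (d : α) (K : List Int)
    (hnd : (K.map Int.toNat).Nodup) (l : List α) (j : Nat) :
    (K.foldl (fun g k => g.set k.toNat (f (g.getD k.toNat d))) l)[j]? =
      if j ∈ K.map Int.toNat ∧ j < l.length then some (f (l.getD j d)) else l[j]? := by
  induction K generalizing l with
  | nil => simp
  | cons k K ih =>
    simp only [List.map_cons, List.nodup_cons] at hnd
    rw [List.foldl_cons, ih hnd.2, List.length_set]
    simp only [List.map_cons, List.mem_cons]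
    by_cases hj : j < l.length
    · by_cases hk : j = k.toNat
      · subst hk
        rw [if_neg (fun h => hnd.1 h.1), if_pos ⟨Or.inl rfl, hj⟩,
            List.getElem?_set_self hj]
      · by_cases hmem : j ∈ K.map Int.toNat
        · rw [if_pos ⟨hmem, hj⟩, if_pos ⟨Or.inr hmem, hj⟩]
          have hgd : (l.set k.toNat (f (l.getD k.toNat d))).getD j d = l.getD j d := by
            rw [List.getD_eq_getElem?_getD, List.getElem?_set_ne (fun h => hk h.symm),
                ← List.getD_eq_getElem?_getD]
          rw [hgd]
        · rw [if_neg (fun h => hmem h.1),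
              if_neg (fun h => h.1.elim (fun h1 => hk h1) (fun h2 => hmem h2)),
              List.getElem?_set_ne (fun h => hk h.symm)]
    · rw [if_neg (fun h => hj h.2), if_neg (fun h => hj h.2),
          List.getElem?_eq_none (by simpa using hj),
          List.getElem?_eq_none (by simpa using hj)]

-- stepped ranges have distinct (and nonnegative) values
theorem pv_nodup_map_toNat_pyRange (n s : Int) (hs : 0 < s) :
    ((PySem.List.pyRange 0 n s).map Int.toNat).Nodup := by
  rw [PySem.List.pyRange_of_pos 0 n hs, List.map_map]
  apply List.Nodup.map_on _ List.nodup_range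
  intro a _ b _ h
  simp only [Function.comp_apply, zero_add] at h
  have h1 : (0 : Int) ≤ s * a := by positivity
  have h2 : (0 : Int) ≤ s * b := by positivity
  have h3 : (s : Int) * a = s * b := by omega
  exact_mod_cast mul_left_cancel₀ (ne_of_gt hs) h3

theorem pv_mem_map_toNat (K : List Int) (hK : ∀ k ∈ K, 0 ≤ k) (j : Nat) :
    j ∈ K.map Int.toNat ↔ (j : Int) ∈ K := by
  simp only [List.mem_map]
  constructor
  · rintro ⟨k, hk, rfl⟩
    rwa [Int.toNat_of_nonneg (hK k hk)]
  · intro h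
    exact ⟨j, h, by simp⟩

-- membership in a stepped range, for a Nat index
theorem pv_mem_pyRange_step (n s : Int) (hs : 0 < s) (j : Nat) :
    j ∈ (PySem.List.pyRange 0 n s).map Int.toNat ↔ (j : Int) < n ∧ s ∣ (j : Int) := by
  rw [pv_mem_map_toNat _ (fun k hk => ((PySem.List.mem_pyRange_iff_of_pos hs k).1 hk).1),
      PySem.List.mem_pyRange_iff_of_pos hs]
  constructor
  · rintro ⟨-, h2, h3⟩; exact ⟨h2, by simpa using h3⟩
  · rintro ⟨h2, h3⟩; exact ⟨by positivity, h2, by simpa using h3⟩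

-- the stamped row equals A's predicate row
theorem pv_qrow (width : Int) :
    (PySem.List.pyRange 0 width 8).foldl (fun row c => row.set c.toNat "Q")
      (List.replicate width.toNat "r")
    = (PySem.List.pyRange 0 width 1).map (fun col => if col % 8 != 0 then "r" else "Q") := by
  have hshape : (fun (row : List String) (c : Int) => row.set c.toNat "Q")
      = (fun g k => g.set k.toNat ((fun (_ : String) => "Q") (g.getD k.toNat ""))) := rfl
  rw [hshape]
  apply List.ext_getElem?
  intro j
  rw [pv_foldl_set_getElem? (fun (_ : String) => "Q") "" _
        (pv_nodup_map_toNat_pyRange width 8 (by norm_num)) _ j]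
  simp only [List.length_replicate]
  by_cases hj : j < width.toNat
  · have hjw : (j : Int) < width := by omega
    rw [List.getElem?_map, PySem.List.getElem?_pyRange_one,
        if_pos (by omega : j < (width - 0).toNat)]
    by_cases hdvd : (8 : Int) ∣ (j : Int)
    · rw [if_pos ⟨(pv_mem_pyRange_step width 8 (by norm_num) j).2 ⟨hjw, hdvd⟩, hj⟩]
      simp [hdvd]
    · rw [if_neg (fun h => hdvd ((pv_mem_pyRange_step width 8 (by norm_num) j).1 h.1).2)]
      rw [List.getElem?_replicate, if_pos hj]
      simp [hdvd]
  · rw [if_neg (fun h => hj h.2),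
        List.getElem?_eq_none (by simpa using hj),
        List.getElem?_eq_none (by simp [PySem.List.length_pyRange_one]; omega)]

-- ===== VERDICT (by name: the statement is the Claim_ definition above) =====
theorem generate_base_grid_spec : Claim_equal_generate_base_grid := by
  intro width height _
  unfold Spec_generate_base_grid generate_base_grid generate_base_grid_alt
  rw [pv_foldl_if_append]
  simp only [List.nil_append]
  have hshape : (fun (g : List (List String)) (r : Int) =>
      g.set r.toNat ((PySem.List.pyRange 0 width 8).foldl (fun row c => row.set c.toNat "Q")
        (g.getD r.toNat [])))
      = (fun g k => g.set k.toNat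
          ((fun row => (PySem.List.pyRange 0 width 8).foldl (fun row c => row.set c.toNat "Q") row)
            (g.getD k.toNat ([] : List String)))) := rfl
  rw [hshape]
  apply List.ext_getElem?
  intro j
  rw [pv_foldl_set_getElem?
        (fun row => (PySem.List.pyRange 0 width 8).foldl (fun row c => row.set c.toNat "Q") row)
        ([] : List String) _
        (pv_nodup_map_toNat_pyRange height 3 (by norm_num)) _ j]
  simp only [List.length_map, PySem.List.length_pyRange_one]
  by_cases hj : j < (height - 0).toNat
  · have hjh : (j : Int) < height := by omega
    rw [List.getElem?_map, PySem.List.getElem?_pyRange_one, if_pos hj]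
    have hgetD : ((PySem.List.pyRange 0 height 1).map
        (fun _ => List.replicate width.toNat "r")).getD j [] = List.replicate width.toNat "r" := by
      rw [List.getD_eq_getElem?_getD, List.getElem?_map, PySem.List.getElem?_pyRange_one,
          if_pos hj]
      rfl
    by_cases hdvd : (3 : Int) ∣ (j : Int)
    · rw [if_pos ⟨(pv_mem_pyRange_step height 3 (by norm_num) j).2 ⟨hjh, hdvd⟩, hj⟩, hgetD]
      rw [pv_qrow]
      simp [hdvd]
      exact pv_flatten_map_singleton _ _
    · rw [if_neg (fun h => hdvd ((pv_mem_pyRange_step height 3 (by norm_num) j).1 h.1).2)]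
      rw [List.getElem?_map, PySem.List.getElem?_pyRange_one, if_pos hj]
      simp [hdvd]
  · rw [if_neg (fun h => hj h.2),
        List.getElem?_eq_none (by simp [PySem.List.length_pyRange_one]; omega),
        List.getElem?_eq_none (by simp [PySem.List.length_pyRange_one]; omega)]
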